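-- pv_equiv track=rewrite | github.com/MagaluCloud/mgc-sdk-go | docs/main_generator.py | clean_go_doc_output
-- ===== SOURCE A (Python) =====
-- def clean_go_doc_output(doc_output: str) -> str:
--     """Cleans and formats go doc output for Markdown"""
--     if not doc_output:
--         return ""
--
--     lines = doc_output.split('\n')
--
--     # Remove the first line
--     if lines:
--         lines = lines[1:]
--
--     cleaned_lines = []
--     in_code_block = False
--     code_block_content = []
--     constants_removed = False
--     types_removed = False
--
--     for line in lines:
--         # Skip empty lines at the beginning
--         if not cleaned_lines and not line.strip():
--             continue
--
--         # Remove "CONSTANTS" and "TYPES" strings (case-sensitive, only once each)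
--         stripped_line = line.strip()
--         if not constants_removed and stripped_line == "CONSTANTS":
--             constants_removed = True
--             continue
--         if not types_removed and stripped_line == "TYPES":
--             types_removed = True
--             continue
--
--         # Check if this line starts a code block
--         if (stripped_line.startswith('func ') or
--             stripped_line.startswith('type ') or
--             stripped_line.startswith('const ') or
--             stripped_line.startswith('var ') or
--             stripped_line.startswith('package ') or
--             stripped_line.startswith('import ')):
--
--             # If we were in a code block, close it
--             if in_code_block:
--                 if code_block_content:
--                     # Always use generic code block to avoid highlighting issues
--                     cleaned_lines.append("```")
--                     cleaned_lines.extend(code_block_content)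
--                     cleaned_lines.append("```")
--                 in_code_block = False
--                 code_block_content = []
--
--             # Start new code block
--             in_code_block = True
--             code_block_content = [stripped_line]
--
--         elif in_code_block:
--             # Continue code block
--             if line.strip():
--                 code_block_content.append(line.strip())
--             else:
--                 # Empty line in code block
--                 code_block_content.append("")
--
--         elif line.strip().startswith('//'):
--             # Convert Go comments to Markdown
--             comment = line.strip()[2:].strip()
--             if comment:
--                 # Escape any problematic characters in comments
--                 comment = comment.replace("'", "\\'").replace('"', '\\"')
--                 cleaned_lines.append(f"*{comment}*")
--
--         elif line.strip():
--             # Regular text - escape problematic characters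
--             text = line.strip()
--             text = text.replace("'", "\\'").replace('"', '\\"')
--             cleaned_lines.append(text)
--
--     # Close any remaining code block
--     if in_code_block and code_block_content:
--         # Always use generic code block to avoid highlighting issues
--         cleaned_lines.append("```")
--         cleaned_lines.extend(code_block_content)
--         cleaned_lines.append("```")
--
--     return '\n'.join(cleaned_lines).strip()
-- ===== SOURCE B (Python) =====
-- def _escape(s):
--     return s.replace("'", "\\'").replace('"', '\\"')
--
--
-- def _is_code_start(s):
--     return s.startswith(('func ', 'type ', 'const ', 'var ', 'package ', 'import '))
--
--
-- def _remove_first(lines, target):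
--     """Drop the first line whose stripped form equals target."""
--     for i, line in enumerate(lines):
--         if line.strip() == target:
--             return lines[:i] + lines[i + 1:]
--     return lines
--
--
-- def _segments(lines):
--     """Partition lines into typed segments: ('code', [lines]) | ('comment', inner) | ('text', s)."""
--     segs = []
--     cur = None  # open code-block content, or None
--     for line in lines:
--         s = line.strip()
--         if _is_code_start(s):
--             if cur is not None:
--                 segs.append(('code', cur))
--             cur = [s]
--         elif cur is not None:
--             cur.append(s)
--         elif s.startswith('//'):
--             inner = s[2:].strip()
--             if inner:
--                 segs.append(('comment', inner))
--         elif s: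
--             segs.append(('text', s))
--     if cur is not None:
--         segs.append(('code', cur))
--     return segs
--
--
-- def clean_go_doc_output(doc_output: str) -> str:
--     """Cleans and formats go doc output for Markdown"""
--     if not doc_output:
--         return ""
--     lines = doc_output.split('\n')[1:]
--     lines = _remove_first(_remove_first(lines, 'CONSTANTS'), 'TYPES')
--     out = []
--     for kind, body in _segments(lines):
--         if kind == 'code':
--             out.append('```')
--             out.extend(body)
--             out.append('```')
--         elif kind == 'comment':
--             out.append('*' + _escape(body) + '*')
--         else:
--             out.append(_escape(body))
--     return '\n'.join(out).strip()
-- ===== Notes on version B (the rewrite author's own statement) =====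
-- stated objective: alternative
-- what changed: B replaces A's single stateful loop (in-code flag, once-only CONSTANTS/TYPES flags, output-built-so-far test) by a pipeline: remove the first CONSTANTS and first TYPES lines up front, partition the remaining lines into typed segments (code blocks / comments / text), then render the segments to Markdown.
-- intended difference: On inputs whose first rendered segment is a code block containing a blank line (nothing emitted before it), A's skip-leading-blank-lines test fires even inside the open code block and silently drops those blank lines from the code, while B keeps them; preserving the blank lines of the code verbatim is the intended formatting. — e.g. on clean_go_doc_output("x\nfunc f\n\na"): A returns "```\nfunc f\na\n```", B returns "```\nfunc f\n\na\n```"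
import Mathlib
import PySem

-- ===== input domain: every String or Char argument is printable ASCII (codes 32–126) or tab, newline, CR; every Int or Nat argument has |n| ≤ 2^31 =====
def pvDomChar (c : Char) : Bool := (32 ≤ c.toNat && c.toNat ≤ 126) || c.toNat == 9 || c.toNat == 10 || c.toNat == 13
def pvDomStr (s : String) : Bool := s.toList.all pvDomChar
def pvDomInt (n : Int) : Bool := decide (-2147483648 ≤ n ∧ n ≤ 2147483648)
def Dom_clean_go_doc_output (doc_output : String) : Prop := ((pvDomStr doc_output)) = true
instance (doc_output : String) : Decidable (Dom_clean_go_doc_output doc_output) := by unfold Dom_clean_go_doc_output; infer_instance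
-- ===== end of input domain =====

-- B re-renders by partitioning the (pre-filtered) lines into typed segments first, instead of A's
-- single stateful loop with once-only flags; on the D_ inputs A drops blank lines of the first code
-- block and B keeps them (see the sentence above D_).

-- ===== PORT A =====
structure StA where
  cleaned : List String
  inCode : Bool
  content : List String
  cRem : Bool
  tRem : Bool

def stepA (st : StA) (line : String) : StA :=
  -- Skip empty lines at the beginning
  if st.cleaned = [] ∧ PySem.Str.strip line = "" then st
  else
    let s := PySem.Str.strip line
    if st.cRem = false ∧ s = "CONSTANTS" then { st with cRem := true }
    else if st.tRem = false ∧ s = "TYPES" then { st with tRem := true }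
    else if PySem.Str.startswith s "func " || PySem.Str.startswith s "type " ||
            PySem.Str.startswith s "const " || PySem.Str.startswith s "var " ||
            PySem.Str.startswith s "package " || PySem.Str.startswith s "import " then
      let st' :=
        if st.inCode then
          if st.content ≠ [] then
            { st with cleaned := st.cleaned ++ ["```"] ++ st.content ++ ["```"], inCode := false, content := [] }
          else { st with inCode := false, content := [] }
        else st
      { st' with inCode := true, content := [s] }
    else if st.inCode then
      if PySem.Str.strip line ≠ "" then { st with content := st.content ++ [PySem.Str.strip line] }
      else { st with content := st.content ++ [""] }
    else if PySem.Str.startswith (PySem.Str.strip line) "//" then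
      let comment := PySem.Str.strip (PySem.Str.slice (PySem.Str.strip line) (some 2) none)
      if comment ≠ "" then
        { st with cleaned := st.cleaned ++ ["*" ++ PySem.Str.replace (PySem.Str.replace comment "'" "\\'") "\"" "\\\"" ++ "*"] }
      else st
    else if PySem.Str.strip line ≠ "" then
      { st with cleaned := st.cleaned ++ [PySem.Str.replace (PySem.Str.replace (PySem.Str.strip line) "'" "\\'") "\"" "\\\""] }
    else st

def clean_go_doc_output (doc_output : String) : String :=
  if doc_output = "" then ""
  else
    let lines0 := (PySem.Str.split? doc_output "\n").getD []
    let lines := if lines0 ≠ [] then lines0.drop 1 else lines0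
    let st := lines.foldl stepA ⟨[], false, [], false, false⟩
    let cleaned :=
      if st.inCode ∧ st.content ≠ [] then st.cleaned ++ ["```"] ++ st.content ++ ["```"]
      else st.cleaned
    PySem.Str.strip (PySem.Str.join "\n" cleaned)

-- ===== PORT B =====
def escB (s : String) : String :=
  PySem.Str.replace (PySem.Str.replace s "'" "\\'") "\"" "\\\""

def isCodeStartB (s : String) : Bool :=
  PySem.Str.startswith s "func " || PySem.Str.startswith s "type " ||
  PySem.Str.startswith s "const " || PySem.Str.startswith s "var " ||
  PySem.Str.startswith s "package " || PySem.Str.startswith s "import "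

-- drop the first line whose stripped form equals target
def removeFirstB (target : String) : List String → List String
  | [] => []
  | l :: ls => if PySem.Str.strip l = target then ls else l :: removeFirstB target ls

inductive SegB where
  | code : List String → SegB
  | comment : String → SegB
  | text : String → SegB
deriving DecidableEq, Repr

def segGo : List String → Option (List String) → List SegB → List SegB
  | [], cur, segs =>
    match cur with
    | some c => segs ++ [SegB.code c]
    | none => segs
  | l :: ls, cur, segs =>
    let s := PySem.Str.strip l
    if isCodeStartB s then
      segGo ls (some [s]) (match cur with | some c => segs ++ [SegB.code c] | none => segs)
    else
      match cur with
      | some c => segGo ls (some (c ++ [s])) segs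
      | none =>
        if PySem.Str.startswith s "//" then
          let inner := PySem.Str.strip (PySem.Str.slice s (some 2) none)
          if inner ≠ "" then segGo ls none (segs ++ [SegB.comment inner]) else segGo ls none segs
        else if s ≠ "" then segGo ls none (segs ++ [SegB.text s])
        else segGo ls none segs

def renderSeg : SegB → List String
  | SegB.code c => "```" :: (c ++ ["```"])
  | SegB.comment c => ["*" ++ escB c ++ "*"]
  | SegB.text t => [escB t]

def clean_go_doc_output_alt (doc_output : String) : String :=
  if doc_output = "" then ""
  else
    let lines := ((PySem.Str.split? doc_output "\n").getD []).drop 1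
    let lines := removeFirstB "TYPES" (removeFirstB "CONSTANTS" lines)
    let segs := segGo lines none []
    PySem.Str.strip (PySem.Str.join "\n" (segs.flatMap renderSeg))

-- ===== PRECONDITION & SPEC =====

-- D_ helpers (independent of both ports): they scan the input's lines only.
def dIsCode (s : String) : Bool :=
  ["func ", "type ", "const ", "var ", "package ", "import "].any (fun p => PySem.Str.startswith s p)

def dRemoveFirst (target : String) (ls : List String) : List String :=
  match ls.findIdx? (fun l => PySem.Str.strip l = target) with
  | some i => ls.eraseIdx i
  | none => ls

-- a line that produces no output: blank, or a comment with empty body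
def dSkip (l : String) : Bool :=
  PySem.Str.strip l == "" ||
  (PySem.Str.startswith (PySem.Str.strip l) "//" &&
   PySem.Str.strip (PySem.Str.slice (PySem.Str.strip l) (some 2) none) == "")

-- shape of the input's lines: the first output-producing line opens a code block,
-- and a blank line falls inside that block (before the next code-start line)
def dHit (L : List String) : Bool :=
  match L.dropWhile dSkip with
  | [] => false
  | l :: ls =>
    dIsCode (PySem.Str.strip l) &&
    (ls.takeWhile (fun x => !dIsCode (PySem.Str.strip x))).any (fun x => PySem.Str.strip x == "")

-- On inputs whose first rendered segment is a code block containing a blank line (nothing emitted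
-- before it), A's skip-leading-blank-lines test fires even inside the open code block and silently
-- drops those blank lines from the code, while B keeps them; preserving the code's blank lines
-- verbatim is the intended formatting.
def D_clean_go_doc_output (doc_output : String) : Prop :=
  doc_output ≠ "" ∧
  dHit (dRemoveFirst "TYPES" (dRemoveFirst "CONSTANTS"
    (((PySem.Str.split? doc_output "\n").getD []).drop 1))) = true
instance (doc_output : String) : Decidable (D_clean_go_doc_output doc_output) := by
  unfold D_clean_go_doc_output; infer_instance

def Spec_clean_go_doc_output (doc_output : String) (out : String) : Prop :=
  ¬ D_clean_go_doc_output doc_output → out = clean_go_doc_output_alt doc_output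
instance (doc_output : String) (out : String) : Decidable (Spec_clean_go_doc_output doc_output out) := by
  unfold Spec_clean_go_doc_output; infer_instance

def pvDiffWitness_clean_go_doc_output : String := "x\nfunc f\n\na"
def pvDiffWitnessOut_clean_go_doc_output : String × String :=
  ("```\nfunc f\na\n```", "```\nfunc f\n\na\n```")

-- ===== CLAIM (what is proved, stated in full; the proofs are below) =====
def Claim_unchanged_clean_go_doc_output : Prop := ∀ (doc_output : String), Dom_clean_go_doc_output doc_output → Spec_clean_go_doc_output doc_output (clean_go_doc_output doc_output)
def Claim_changed_clean_go_doc_output : Prop := Dom_clean_go_doc_output (pvDiffWitness_clean_go_doc_output) ∧ D_clean_go_doc_output (pvDiffWitness_clean_go_doc_output) ∧ clean_go_doc_output (pvDiffWitness_clean_go_doc_output) = pvDiffWitnessOut_clean_go_doc_output.1 ∧ clean_go_doc_output_alt (pvDiffWitness_clean_go_doc_output) = pvDiffWitnessOut_clean_go_doc_output.2 ∧ pvDiffWitnessOut_clean_go_doc_output.1 ≠ pvDiffWitnessOut_clean_go_doc_output.2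
def Claim_exact_clean_go_doc_output : Prop := ∀ (doc_output : String), Dom_clean_go_doc_output doc_output → D_clean_go_doc_output doc_output → clean_go_doc_output doc_output ≠ clean_go_doc_output_alt doc_output

-- ===== LEMMAS AND PROOFS =====

-- A drops blank lines of the first (pre-output) code block; this proof-side fix-up expresses that.
def firstFix : List SegB → List SegB
  | SegB.code c :: rest => SegB.code (c.filter (· ≠ "")) :: rest
  | segs => segs

-- A's interleaved once-only removal of CONSTANTS/TYPES, as a flagged recursion (proof-side)
def remBoth (c t : Bool) : List String → List String
  | [] => []
  | l :: ls =>
    if c = false ∧ PySem.Str.strip l = "CONSTANTS" then remBoth true t ls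
    else if t = false ∧ PySem.Str.strip l = "TYPES" then remBoth c true ls
    else l :: remBoth c t ls

def finA (st : StA) : List String :=
  if st.inCode ∧ st.content ≠ [] then st.cleaned ++ ["```"] ++ st.content ++ ["```"] else st.cleaned

theorem remBoth_tt (ls : List String) : remBoth true true ls = ls := by
  induction ls with
  | nil => rfl
  | cons l ls ih => simp [remBoth, ih]

theorem remBoth_tf (ls : List String) : remBoth true false ls = removeFirstB "TYPES" ls := by
  induction ls with
  | nil => rfl
  | cons l ls ih =>
    by_cases h : PySem.Str.strip l = "TYPES" <;>
      simp [remBoth, removeFirstB, h, ih, remBoth_tt]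

theorem remBoth_ft (ls : List String) : remBoth false true ls = removeFirstB "CONSTANTS" ls := by
  induction ls with
  | nil => rfl
  | cons l ls ih =>
    by_cases h : PySem.Str.strip l = "CONSTANTS" <;>
      simp [remBoth, removeFirstB, h, ih, remBoth_tt]

theorem remBoth_ff (ls : List String) :
    remBoth false false ls = removeFirstB "TYPES" (removeFirstB "CONSTANTS" ls) := by
  induction ls with
  | nil => rfl
  | cons l ls ih =>
    by_cases hc : PySem.Str.strip l = "CONSTANTS"
    · simp [remBoth, removeFirstB, hc, remBoth_tf]
    · by_cases ht : PySem.Str.strip l = "TYPES"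
      · simp [remBoth, removeFirstB, hc, ht, remBoth_ft]
      · simp [remBoth, removeFirstB, hc, ht, ih]

theorem dRemoveFirst_eq (target : String) (ls : List String) :
    dRemoveFirst target ls = removeFirstB target ls := by
  induction ls with
  | nil => rfl
  | cons l ls ih =>
    by_cases h : PySem.Str.strip l = target
    · simp [dRemoveFirst, removeFirstB, h, List.findIdx?_cons]
    · rw [removeFirstB, if_neg h, ← ih]
      unfold dRemoveFirst
      rw [List.findIdx?_cons]
      simp only [h, decide_false, Bool.false_eq_true, if_false]
      cases hf : List.findIdx? (fun l => decide (PySem.Str.strip l = target)) ls with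
      | none => simp [hf]
      | some i => simp [hf, List.eraseIdx_cons_succ]

theorem segGo_acc (ls : List String) (cur : Option (List String)) (segs : List SegB) :
    segGo ls cur segs = segs ++ segGo ls cur [] := by
  induction ls generalizing cur segs with
  | nil => cases cur <;> simp [segGo]
  | cons l ls ih =>
    have app : ∀ (cur' : Option (List String)) (x : SegB),
        segGo ls cur' (segs ++ [x]) = segs ++ segGo ls cur' [x] := by
      intro cur' x
      rw [ih cur' (segs ++ [x]), ih cur' [x]]
      simp
    cases cur with
    | none =>
      by_cases h1 : isCodeStartB (PySem.Str.strip l)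
      · simp only [segGo, h1, if_true]
        exact ih _ _
      · by_cases h2 : PySem.Str.startswith (PySem.Str.strip l) "//"
        · by_cases h3 : PySem.Str.strip (PySem.Str.slice (PySem.Str.strip l) (some 2) none) = ""
          · simp only [segGo, h1, h2, h3, if_false, if_true, ne_eq, not_true_eq_false,
              Bool.false_eq_true, not_not]
            exact ih _ _
          · simp only [segGo, h1, h2, h3, if_false, if_true, ne_eq, not_false_eq_true,
              Bool.false_eq_true]
            exact app _ _
        · by_cases h4 : PySem.Str.strip l = ""
          · simp only [segGo, h1, h2, h4, if_false, ne_eq, not_true_eq_false,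
              Bool.false_eq_true, if_true, not_not]
            exact ih _ _
          · simp only [segGo, h1, h2, h4, if_false, ne_eq, not_false_eq_true,
              Bool.false_eq_true, if_true]
            exact app _ _
    | some c =>
      by_cases h1 : isCodeStartB (PySem.Str.strip l)
      · simp only [segGo, h1, if_true]
        exact app _ _
      · simp only [segGo, h1, Bool.false_eq_true, if_false]
        exact ih _ _

theorem firstFix_nil : firstFix [] = [] := rfl
theorem firstFix_cons_code (a : List String) (X : List SegB) :
    firstFix (SegB.code a :: X) = SegB.code (a.filter (· ≠ "")) :: X := rfl

theorem dIsCode_eq (s : String) : dIsCode s = isCodeStartB s := by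
  simp [dIsCode, isCodeStartB, Bool.or_assoc]

theorem isCodeStartB_ne_empty (s : String) (h : isCodeStartB s = true) : s ≠ "" := by
  intro he; subst he; exact absurd h (by decide)

theorem prefix_clash (s p q : String) (c d : Char) (tp tq : List Char)
    (hpl : p.toList = c :: tp) (hql : q.toList = d :: tq) (hne : c ≠ d)
    (hp : PySem.Str.startswith s p = true) (hq : PySem.Str.startswith s q = true) : False := by
  rw [PySem.Str.startswith_eq, PySem.Chars.startswith_iff] at hp hq
  obtain ⟨a, ha⟩ := hp
  obtain ⟨b, hb⟩ := hq
  rw [hpl] at ha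
  rw [hql] at hb
  have := ha.trans hb.symm
  simp only [List.cons_append, List.cons.injEq] at this
  exact hne this.1

theorem code_not_comment (s : String) (h : isCodeStartB s = true) :
    PySem.Str.startswith s "//" = false := by
  rcases Bool.eq_false_or_eq_true (PySem.Str.startswith s "//") with hq | hq
  case inr => exact hq
  case inl =>
    exfalso
    simp only [isCodeStartB, Bool.or_eq_true] at h
    rcases h with ((((h | h) | h) | h) | h) | h
    · exact prefix_clash s "func " "//" 'f' '/' "unc ".toList "/".toList (by decide) (by decide) (by decide) h hq
    · exact prefix_clash s "type " "//" 't' '/' "ype ".toList "/".toList (by decide) (by decide) (by decide) h hq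
    · exact prefix_clash s "const " "//" 'c' '/' "onst ".toList "/".toList (by decide) (by decide) (by decide) h hq
    · exact prefix_clash s "var " "//" 'v' '/' "ar ".toList "/".toList (by decide) (by decide) (by decide) h hq
    · exact prefix_clash s "package " "//" 'p' '/' "ackage ".toList "/".toList (by decide) (by decide) (by decide) h hq
    · exact prefix_clash s "import " "//" 'i' '/' "mport ".toList "/".toList (by decide) (by decide) (by decide) h hq

theorem firstFix_inside (ls : List String) (c : List String)
    (h : (ls.takeWhile (fun x => !dIsCode (PySem.Str.strip x))).any (fun x => PySem.Str.strip x == "") = false)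
    (hc : ∀ x ∈ c, x ≠ "") :
    firstFix (segGo ls (some c) []) = segGo ls (some c) [] := by
  induction ls generalizing c with
  | nil =>
    simp only [segGo, List.nil_append, firstFix_cons_code]
    rw [List.filter_eq_self.mpr (by intro x hx; simpa using hc x hx)]
  | cons l ls ih =>
    by_cases hk : isCodeStartB (PySem.Str.strip l) = true
    · simp only [segGo, hk, if_true]
      rw [segGo_acc]
      simp only [List.nil_append, List.singleton_append, firstFix_cons_code]
      rw [List.filter_eq_self.mpr (by intro x hx; simpa using hc x hx)]
    · have hk' : dIsCode (PySem.Str.strip l) = false := by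
        rw [dIsCode_eq]; exact Bool.eq_false_iff.mpr hk
      rw [List.takeWhile_cons, hk'] at h
      simp only [Bool.not_false, if_true, List.any_cons, Bool.or_eq_false_iff, beq_eq_false_iff_ne, ne_eq] at h
      obtain ⟨hb, h'⟩ := h
      simp only [segGo, hk, Bool.false_eq_true, if_false]
      exact ih (c ++ [PySem.Str.strip l])
        (by simpa using h')
        (by intro x hx; rcases List.mem_append.mp hx with h1 | h1
            · exact hc x h1
            · simp at h1; subst h1; exact hb)

theorem firstFix_before (ls : List String) (h : dHit ls = false) :
    firstFix (segGo ls none []) = segGo ls none [] := by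
  induction ls with
  | nil => rfl
  | cons l ls ih =>
    by_cases hb : PySem.Str.strip l = ""
    · have hsk : dSkip l = true := by simp [dSkip, hb]
      have h' : dHit ls = false := by
        rw [dHit] at h; rw [List.dropWhile_cons, if_pos hsk] at h; rw [dHit]; exact h
      simp only [segGo]
      rw [if_neg (show ¬(isCodeStartB (PySem.Str.strip l) = true) by rw [hb]; decide),
        if_neg (show ¬(PySem.Str.startswith (PySem.Str.strip l) "//" = true) by rw [hb]; decide),
        if_neg (not_not_intro hb)]
      exact ih h'
    · by_cases hk : isCodeStartB (PySem.Str.strip l) = true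
      · have hnc := code_not_comment _ hk
        have hsk : dSkip l = false := by
          unfold dSkip
          rw [hnc, Bool.false_and, Bool.or_false, beq_eq_false_iff_ne]
          exact hb
        have h' : (ls.takeWhile (fun x => !dIsCode (PySem.Str.strip x))).any (fun x => PySem.Str.strip x == "") = false := by
          have hd : List.dropWhile dSkip (l :: ls) = l :: ls := by
            rw [List.dropWhile_cons, if_neg (by rw [hsk]; exact Bool.false_ne_true)]
          rw [dHit, hd] at h
          have hmm : (dIsCode (PySem.Str.strip l) &&
              (ls.takeWhile (fun x => !dIsCode (PySem.Str.strip x))).any (fun x => PySem.Str.strip x == "")) = false := h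
          rw [dIsCode_eq, hk, Bool.true_and] at hmm
          exact hmm
        simp only [segGo, hk, if_true]
        exact firstFix_inside ls [PySem.Str.strip l] h'
          (by intro x hx; simp at hx; subst hx; exact isCodeStartB_ne_empty _ hk)
      · by_cases h2 : PySem.Str.startswith (PySem.Str.strip l) "//" = true
        · by_cases h3 : PySem.Str.strip (PySem.Str.slice (PySem.Str.strip l) (some 2) none) = ""
          · have hsk : dSkip l = true := by
              unfold dSkip
              rw [h2, Bool.true_and,
                show (PySem.Str.strip (PySem.Str.slice (PySem.Str.strip l) (some 2) none) == "") = true from beq_iff_eq.mpr h3,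
                Bool.or_true]
            have h' : dHit ls = false := by
              rw [dHit] at h; rw [List.dropWhile_cons, if_pos hsk] at h; rw [dHit]; exact h
            simp only [segGo, hk, h2, Bool.false_eq_true, if_false, if_true, ne_eq]
            rw [if_neg (not_not_intro h3)]
            exact ih h'
          · simp only [segGo, hk, h2, Bool.false_eq_true, if_false, if_true, ne_eq]
            rw [if_pos h3]
            rw [segGo_acc]
            rfl
        · simp only [segGo, hk, h2, Bool.false_eq_true, if_false, ne_eq]
          rw [if_pos hb]
          rw [segGo_acc]
          rfl

theorem sim1 (ls : List String) (c t : Bool) (cleaned : List String) (cur : Option (List String))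
    (hcl : cleaned ≠ []) (hcur : ∀ cc, cur = some cc → cc ≠ []) :
    finA (ls.foldl stepA ⟨cleaned, cur.isSome, cur.getD [], c, t⟩)
      = cleaned ++ (segGo (remBoth c t ls) cur []).flatMap renderSeg := by
  induction ls generalizing c t cleaned cur with
  | nil =>
    cases cur with
    | none => simp [remBoth, segGo, finA]
    | some cc =>
      have hcc := hcur cc rfl
      simp [remBoth, segGo, finA, hcc, renderSeg]
  | cons l ls ih =>
    simp only [List.foldl_cons]
    by_cases hb : PySem.Str.strip l = ""
    · -- blank line
      cases cur with
      | none =>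
        have hst : stepA ⟨cleaned, (none : Option (List String)).isSome, (none : Option (List String)).getD [], c, t⟩ l
            = ⟨cleaned, false, [], c, t⟩ := by
          simp only [stepA, Option.isSome_some, Option.isSome_none, Option.getD_some, Option.getD_none]
          rw [if_neg (show ¬(cleaned = [] ∧ PySem.Str.strip l = "") by simp [hcl]), if_neg (by simp [hb]), if_neg (by simp [hb]),
            if_neg (by rw [hb]; decide), if_neg (show ¬(false = true) by decide), if_neg (by rw [hb]; decide),
            if_neg (not_not_intro hb)]
        rw [hst]
        have key := ih c t cleaned none hcl (by intro cc hh; cases hh)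
        simp only [Option.isSome_some, Option.isSome_none, Option.getD_some, Option.getD_none] at key
        rw [key]
        rw [show remBoth c t (l :: ls) = l :: remBoth c t ls by
          simp only [remBoth]; rw [if_neg (by simp [hb]), if_neg (by simp [hb])]]
        rw [show segGo (l :: remBoth c t ls) none [] = segGo (remBoth c t ls) none [] by
          simp only [segGo]; rw [if_neg (show ¬(isCodeStartB (PySem.Str.strip l) = true) by rw [hb]; decide), if_neg (show ¬(PySem.Str.startswith (PySem.Str.strip l) "//" = true) by rw [hb]; decide), if_neg (not_not_intro hb)]]
      | some cc =>
        have hst : stepA ⟨cleaned, (some cc).isSome, (some cc).getD [], c, t⟩ l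
            = ⟨cleaned, true, cc ++ [""], c, t⟩ := by
          simp only [stepA, Option.isSome_some, Option.isSome_none, Option.getD_some, Option.getD_none]
          rw [if_neg (show ¬(cleaned = [] ∧ PySem.Str.strip l = "") by simp [hcl]), if_neg (by simp [hb]), if_neg (by simp [hb]),
            if_neg (by rw [hb]; decide), if_pos (show True from trivial), if_neg (not_not_intro hb)]
        rw [hst]
        have key := ih c t cleaned (some (cc ++ [""])) hcl (by intro cc' hh; cases hh; simp)
        simp only [Option.isSome_some, Option.isSome_none, Option.getD_some, Option.getD_none] at key
        rw [key]
        rw [show remBoth c t (l :: ls) = l :: remBoth c t ls by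
          simp only [remBoth]; rw [if_neg (by simp [hb]), if_neg (by simp [hb])]]
        rw [show segGo (l :: remBoth c t ls) (some cc) [] = segGo (remBoth c t ls) (some (cc ++ [""])) [] by
          simp only [segGo]; rw [if_neg (show ¬(isCodeStartB (PySem.Str.strip l) = true) by rw [hb]; decide), hb]]
    · by_cases hC : c = false ∧ PySem.Str.strip l = "CONSTANTS"
      · cases cur with
        | none =>
          have hst : stepA ⟨cleaned, (none : Option (List String)).isSome, (none : Option (List String)).getD [], c, t⟩ l
              = ⟨cleaned, false, [], true, t⟩ := by
            simp only [stepA, Option.isSome_some, Option.isSome_none, Option.getD_some, Option.getD_none]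
            rw [if_neg (by simp [hb]), if_pos hC]
          rw [hst]
          have key := ih true t cleaned none hcl (by intro cc hh; cases hh)
          simp only [Option.isSome_some, Option.isSome_none, Option.getD_some, Option.getD_none] at key
          rw [key]
          rw [show remBoth c t (l :: ls) = remBoth true t ls by
            simp only [remBoth]; rw [if_pos hC]]
        | some cc =>
          have hst : stepA ⟨cleaned, (some cc).isSome, (some cc).getD [], c, t⟩ l
              = ⟨cleaned, true, cc, true, t⟩ := by
            simp only [stepA, Option.isSome_some, Option.isSome_none, Option.getD_some, Option.getD_none]
            rw [if_neg (by simp [hb]), if_pos hC]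
          rw [hst]
          have key := ih true t cleaned (some cc) (by exact hcl) (by intro cc' hh; cases hh; exact hcur cc rfl)
          simp only [Option.isSome_some, Option.isSome_none, Option.getD_some, Option.getD_none] at key
          rw [key]
          rw [show remBoth c t (l :: ls) = remBoth true t ls by
            simp only [remBoth]; rw [if_pos hC]]
      · by_cases hT : t = false ∧ PySem.Str.strip l = "TYPES"
        · cases cur with
          | none =>
            have hst : stepA ⟨cleaned, (none : Option (List String)).isSome, (none : Option (List String)).getD [], c, t⟩ l
                = ⟨cleaned, false, [], c, true⟩ := by
              simp only [stepA, Option.isSome_some, Option.isSome_none, Option.getD_some, Option.getD_none]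
              rw [if_neg (by simp [hb]), if_neg hC, if_pos hT]
            rw [hst]
            have key := ih c true cleaned none hcl (by intro cc hh; cases hh)
            simp only [Option.isSome_some, Option.isSome_none, Option.getD_some, Option.getD_none] at key
            rw [key]
            rw [show remBoth c t (l :: ls) = remBoth c true ls by
              simp only [remBoth]; rw [if_neg hC, if_pos hT]]
          | some cc =>
            have hst : stepA ⟨cleaned, (some cc).isSome, (some cc).getD [], c, t⟩ l
                = ⟨cleaned, true, cc, c, true⟩ := by
              simp only [stepA, Option.isSome_some, Option.isSome_none, Option.getD_some, Option.getD_none]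
              rw [if_neg (by simp [hb]), if_neg hC, if_pos hT]
            rw [hst]
            have key := ih c true cleaned (some cc) (by exact hcl) (by intro cc' hh; cases hh; exact hcur cc rfl)
            simp only [Option.isSome_some, Option.isSome_none, Option.getD_some, Option.getD_none] at key
            rw [key]
            rw [show remBoth c t (l :: ls) = remBoth c true ls by
              simp only [remBoth]; rw [if_neg hC, if_pos hT]]
        · have hsurv : remBoth c t (l :: ls) = l :: remBoth c t ls := by
            simp only [remBoth]; rw [if_neg hC, if_neg hT]
          by_cases hK : isCodeStartB (PySem.Str.strip l) = true
          · have hK2 : (PySem.Str.startswith (PySem.Str.strip l) "func " || PySem.Str.startswith (PySem.Str.strip l) "type " || PySem.Str.startswith (PySem.Str.strip l) "const " || PySem.Str.startswith (PySem.Str.strip l) "var " || PySem.Str.startswith (PySem.Str.strip l) "package " || PySem.Str.startswith (PySem.Str.strip l) "import ") = true := hK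
            cases cur with
            | none =>
              have hst : stepA ⟨cleaned, (none : Option (List String)).isSome, (none : Option (List String)).getD [], c, t⟩ l
                  = ⟨cleaned, true, [PySem.Str.strip l], c, t⟩ := by
                simp only [stepA, Option.isSome_some, Option.isSome_none, Option.getD_some, Option.getD_none]
                rw [if_neg (by simp [hb]), if_neg hC, if_neg hT, if_pos hK2, if_neg (show ¬(false = true) by decide)]
              rw [hst]
              have key := ih c t cleaned (some [PySem.Str.strip l]) hcl (by intro cc' hh; cases hh; simp)
              simp only [Option.isSome_some, Option.isSome_none, Option.getD_some, Option.getD_none] at key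
              rw [key, hsurv]
              rw [show segGo (l :: remBoth c t ls) none [] = segGo (remBoth c t ls) (some [PySem.Str.strip l]) [] by
                simp only [segGo]; rw [if_pos hK]]
            | some cc =>
              have hcc := hcur cc rfl
              have hst : stepA ⟨cleaned, (some cc).isSome, (some cc).getD [], c, t⟩ l
                  = ⟨cleaned ++ ["```"] ++ cc ++ ["```"], true, [PySem.Str.strip l], c, t⟩ := by
                simp only [stepA, Option.isSome_some, Option.isSome_none, Option.getD_some, Option.getD_none]
                rw [if_neg (by simp [hb]), if_neg hC, if_neg hT, if_pos hK2]
                simp [hcc]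
              rw [hst]
              have key := ih c t (cleaned ++ ["```"] ++ cc ++ ["```"]) (some [PySem.Str.strip l])
                (by simp) (by intro cc' hh; cases hh; simp)
              simp only [Option.isSome_some, Option.isSome_none, Option.getD_some, Option.getD_none] at key
              rw [key, hsurv]
              rw [show segGo (l :: remBoth c t ls) (some cc) [] =
                  [SegB.code cc] ++ segGo (remBoth c t ls) (some [PySem.Str.strip l]) [] by
                simp only [segGo]; rw [if_pos hK]; rw [segGo_acc]; simp]
              simp [renderSeg]
          · have hK2 : ¬((PySem.Str.startswith (PySem.Str.strip l) "func " || PySem.Str.startswith (PySem.Str.strip l) "type " || PySem.Str.startswith (PySem.Str.strip l) "const " || PySem.Str.startswith (PySem.Str.strip l) "var " || PySem.Str.startswith (PySem.Str.strip l) "package " || PySem.Str.startswith (PySem.Str.strip l) "import ") = true) := hK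
            cases cur with
            | some cc =>
              have hst : stepA ⟨cleaned, (some cc).isSome, (some cc).getD [], c, t⟩ l
                  = ⟨cleaned, true, cc ++ [PySem.Str.strip l], c, t⟩ := by
                simp only [stepA, Option.isSome_some, Option.isSome_none, Option.getD_some, Option.getD_none]
                rw [if_neg (by simp [hb]), if_neg hC, if_neg hT, if_neg hK2, if_pos (show True from trivial), if_pos hb]
              rw [hst]
              have key := ih c t cleaned (some (cc ++ [PySem.Str.strip l])) hcl (by intro cc' hh; cases hh; simp)
              simp only [Option.isSome_some, Option.isSome_none, Option.getD_some, Option.getD_none] at key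
              rw [key, hsurv]
              rw [show segGo (l :: remBoth c t ls) (some cc) [] =
                  segGo (remBoth c t ls) (some (cc ++ [PySem.Str.strip l])) [] by
                simp only [segGo]; rw [if_neg hK]]
            | none =>
              by_cases hS : PySem.Str.startswith (PySem.Str.strip l) "//" = true
              · by_cases hI : PySem.Str.strip (PySem.Str.slice (PySem.Str.strip l) (some 2) none) = ""
                · have hst : stepA ⟨cleaned, (none : Option (List String)).isSome, (none : Option (List String)).getD [], c, t⟩ l
                      = ⟨cleaned, false, [], c, t⟩ := by
                    simp only [stepA, Option.isSome_some, Option.isSome_none, Option.getD_some, Option.getD_none]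
                    rw [if_neg (by simp [hb]), if_neg hC, if_neg hT, if_neg hK2, if_neg (show ¬(false = true) by decide),
                      if_pos hS, if_neg (not_not_intro hI)]
                  rw [hst]
                  have key := ih c t cleaned none hcl (by intro cc hh; cases hh)
                  simp only [Option.isSome_some, Option.isSome_none, Option.getD_some, Option.getD_none] at key
                  rw [key, hsurv]
                  rw [show segGo (l :: remBoth c t ls) none [] = segGo (remBoth c t ls) none [] by
                    simp only [segGo]; rw [if_neg hK, if_pos hS, if_neg (not_not_intro hI)]]
                · have hst : stepA ⟨cleaned, (none : Option (List String)).isSome, (none : Option (List String)).getD [], c, t⟩ l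
                      = ⟨cleaned ++ ["*" ++ PySem.Str.replace (PySem.Str.replace (PySem.Str.strip (PySem.Str.slice (PySem.Str.strip l) (some 2) none)) "'" "\\'") "\"" "\\\"" ++ "*"], false, [], c, t⟩ := by
                    simp only [stepA, Option.isSome_some, Option.isSome_none, Option.getD_some, Option.getD_none]
                    rw [if_neg (by simp [hb]), if_neg hC, if_neg hT, if_neg hK2, if_neg (show ¬(false = true) by decide),
                      if_pos hS, if_pos hI]
                  rw [hst]
                  have key := ih c t (cleaned ++ ["*" ++ PySem.Str.replace (PySem.Str.replace (PySem.Str.strip (PySem.Str.slice (PySem.Str.strip l) (some 2) none)) "'" "\\'") "\"" "\\\"" ++ "*"]) none (by simp) (by intro cc hh; cases hh)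
                  simp only [Option.isSome_some, Option.isSome_none, Option.getD_some, Option.getD_none] at key
                  rw [key, hsurv]
                  rw [show segGo (l :: remBoth c t ls) none [] =
                  [SegB.comment (PySem.Str.strip (PySem.Str.slice (PySem.Str.strip l) (some 2) none))] ++ segGo (remBoth c t ls) none [] by
                simp only [segGo]; rw [if_neg hK, if_pos hS, if_pos hI]; rw [segGo_acc]; simp]
                  simp [renderSeg, escB]
              · have hst : stepA ⟨cleaned, (none : Option (List String)).isSome, (none : Option (List String)).getD [], c, t⟩ l
                    = ⟨cleaned ++ [PySem.Str.replace (PySem.Str.replace (PySem.Str.strip l) "'" "\\'") "\"" "\\\""], false, [], c, t⟩ := by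
                  simp only [stepA, Option.isSome_some, Option.isSome_none, Option.getD_some, Option.getD_none]
                  rw [if_neg (by simp [hb]), if_neg hC, if_neg hT, if_neg hK2, if_neg (show ¬(false = true) by decide),
                    if_neg hS, if_pos hb]
                rw [hst]
                have key := ih c t (cleaned ++ [PySem.Str.replace (PySem.Str.replace (PySem.Str.strip l) "'" "\\'") "\"" "\\\""]) none (by simp) (by intro cc hh; cases hh)
                simp only [Option.isSome_some, Option.isSome_none, Option.getD_some, Option.getD_none] at key
                rw [key, hsurv]
                rw [show segGo (l :: remBoth c t ls) none [] =
                  [SegB.text (PySem.Str.strip l)] ++ segGo (remBoth c t ls) none [] by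
                simp only [segGo]; rw [if_neg hK, if_neg hS, if_pos hb]; rw [segGo_acc]; simp]
                simp [renderSeg, escB]

theorem sim0 (ls : List String) (c t : Bool) (cur : Option (List String))
    (hcur : ∀ cc, cur = some cc → ∃ h tl, cc = h :: tl ∧ h ≠ "") :
    finA (ls.foldl stepA ⟨[], cur.isSome, (cur.getD []).filter (· ≠ ""), c, t⟩)
      = (firstFix (segGo (remBoth c t ls) cur [])).flatMap renderSeg := by
  induction ls generalizing c t cur with
  | nil =>
    cases cur with
    | none => simp [remBoth, segGo, finA, firstFix_nil]
    | some cc =>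
      obtain ⟨h0, tl0, rfl, hne⟩ := hcur cc rfl
      simp [remBoth, segGo, finA, firstFix_cons_code, renderSeg, hne]
  | cons l ls ih =>
    simp only [List.foldl_cons]
    by_cases hb : PySem.Str.strip l = ""
    · -- blank line while nothing emitted yet: skipped by A, filtered from B's leading code block
      cases cur with
      | none =>
        have hst : stepA ⟨[], (none : Option (List String)).isSome, ((none : Option (List String)).getD []).filter (· ≠ ""), c, t⟩ l
            = ⟨[], false, List.filter (fun a => a ≠ "") [], c, t⟩ := by
          simp only [stepA, Option.isSome_some, Option.isSome_none, Option.getD_some, Option.getD_none]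
          rw [if_pos (show True ∧ PySem.Str.strip l = "" from ⟨trivial, hb⟩)]
        rw [hst]
        have key := ih c t none (by intro cc hh; cases hh)
        simp only [Option.isSome_some, Option.isSome_none, Option.getD_some, Option.getD_none] at key
        rw [key]
        rw [show remBoth c t (l :: ls) = l :: remBoth c t ls by
          simp only [remBoth]; rw [if_neg (by simp [hb]), if_neg (by simp [hb])]]
        rw [show segGo (l :: remBoth c t ls) none [] = segGo (remBoth c t ls) none [] by
          simp only [segGo]; rw [if_neg (show ¬(isCodeStartB (PySem.Str.strip l) = true) by rw [hb]; decide), if_neg (show ¬(PySem.Str.startswith (PySem.Str.strip l) "//" = true) by rw [hb]; decide), if_neg (not_not_intro hb)]]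
      | some cc =>
        obtain ⟨h0, tl0, rfl, hne⟩ := hcur cc rfl
        have hst : stepA ⟨[], (some (h0 :: tl0)).isSome, ((some (h0 :: tl0)).getD []).filter (· ≠ ""), c, t⟩ l
            = ⟨[], true, (h0 :: tl0).filter (· ≠ ""), c, t⟩ := by
          simp only [stepA, Option.isSome_some, Option.isSome_none, Option.getD_some, Option.getD_none]
          rw [if_pos (show True ∧ PySem.Str.strip l = "" from ⟨trivial, hb⟩)]
        rw [hst]
        have key := ih c t (some ((h0 :: tl0) ++ [""])) (by intro cc' hh; cases hh; exact ⟨h0, tl0 ++ [""], rfl, hne⟩)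
        simp only [Option.isSome_some, Option.isSome_none, Option.getD_some, Option.getD_none] at key
        rw [show ((h0 :: tl0) ++ [""]).filter (· ≠ "") = (h0 :: tl0).filter (· ≠ "") by rw [show h0 :: tl0 ++ [""] = (h0 :: tl0) ++ [""] from rfl, List.filter_append]; simp] at key
        rw [key]
        rw [show remBoth c t (l :: ls) = l :: remBoth c t ls by
          simp only [remBoth]; rw [if_neg (by simp [hb]), if_neg (by simp [hb])]]
        rw [show segGo (l :: remBoth c t ls) (some (h0 :: tl0)) [] =
            segGo (remBoth c t ls) (some ((h0 :: tl0) ++ [""])) [] by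
          simp only [segGo]; rw [if_neg (show ¬(isCodeStartB (PySem.Str.strip l) = true) by rw [hb]; decide), hb]]
    · by_cases hC : c = false ∧ PySem.Str.strip l = "CONSTANTS"
      · have hst : ∀ inC cont, stepA ⟨[], inC, cont, c, t⟩ l = ⟨[], inC, cont, true, t⟩ := by
          intro inC cont
          simp only [stepA, Option.isSome_some, Option.isSome_none, Option.getD_some, Option.getD_none]
          rw [if_neg (by simp [hb]), if_pos hC]
        have hrem : remBoth c t (l :: ls) = remBoth true t ls := by
          simp only [remBoth]; rw [if_pos hC]
        cases cur with
        | none =>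
          rw [show ((none : Option (List String)).isSome) = false from rfl]
          rw [hst]
          have key := ih true t none (by intro cc hh; cases hh)
          simp only [Option.isSome_some, Option.isSome_none, Option.getD_some, Option.getD_none, List.filter_nil] at key ⊢
          rw [key, hrem]
        | some cc =>
          rw [show ((some cc).isSome) = true from rfl]
          rw [hst]
          have key := ih true t (some cc) hcur
          simp only [Option.isSome_some, Option.isSome_none, Option.getD_some, Option.getD_none, List.filter_nil] at key ⊢
          rw [key, hrem]
      · by_cases hT : t = false ∧ PySem.Str.strip l = "TYPES"
        · have hst : ∀ inC cont, stepA ⟨[], inC, cont, c, t⟩ l = ⟨[], inC, cont, c, true⟩ := by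
            intro inC cont
            simp only [stepA, Option.isSome_some, Option.isSome_none, Option.getD_some, Option.getD_none]
            rw [if_neg (by simp [hb]), if_neg hC, if_pos hT]
          have hrem : remBoth c t (l :: ls) = remBoth c true ls := by
            simp only [remBoth]; rw [if_neg hC, if_pos hT]
          cases cur with
          | none =>
            rw [show ((none : Option (List String)).isSome) = false from rfl]
            rw [hst]
            have key := ih c true none (by intro cc hh; cases hh)
            simp only [Option.isSome_some, Option.isSome_none, Option.getD_some, Option.getD_none, List.filter_nil] at key ⊢
            rw [key, hrem]
          | some cc =>
            rw [show ((some cc).isSome) = true from rfl]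
            rw [hst]
            have key := ih c true (some cc) hcur
            simp only [Option.isSome_some, Option.isSome_none, Option.getD_some, Option.getD_none, List.filter_nil] at key ⊢
            rw [key, hrem]
        · have hsurv : remBoth c t (l :: ls) = l :: remBoth c t ls := by
            simp only [remBoth]; rw [if_neg hC, if_neg hT]
          by_cases hK : isCodeStartB (PySem.Str.strip l) = true
          · have hK2 : (PySem.Str.startswith (PySem.Str.strip l) "func " || PySem.Str.startswith (PySem.Str.strip l) "type " || PySem.Str.startswith (PySem.Str.strip l) "const " || PySem.Str.startswith (PySem.Str.strip l) "var " || PySem.Str.startswith (PySem.Str.strip l) "package " || PySem.Str.startswith (PySem.Str.strip l) "import ") = true := hK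
            have hsne : PySem.Str.strip l ≠ "" := hb
            cases cur with
            | none =>
              have hst : stepA ⟨[], (none : Option (List String)).isSome, ((none : Option (List String)).getD []).filter (· ≠ ""), c, t⟩ l
                  = ⟨[], true, [PySem.Str.strip l], c, t⟩ := by
                simp only [stepA, Option.isSome_some, Option.isSome_none, Option.getD_some, Option.getD_none]
                rw [if_neg (by simp [hb]), if_neg hC, if_neg hT, if_pos hK2, if_neg (show ¬(false = true) by decide)]
              rw [hst]
              have key := ih c t (some [PySem.Str.strip l]) (by intro cc' hh; cases hh; exact ⟨_, [], rfl, hsne⟩)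
              simp only [Option.isSome_some, Option.isSome_none, Option.getD_some, Option.getD_none] at key
              rw [show ([PySem.Str.strip l]).filter (· ≠ "") = [PySem.Str.strip l] by simp [hsne]] at key
              rw [key, hsurv]
              rw [show segGo (l :: remBoth c t ls) none [] = segGo (remBoth c t ls) (some [PySem.Str.strip l]) [] by
                simp only [segGo]; rw [if_pos hK]]
            | some cc =>
              obtain ⟨h0, tl0, rfl, hne⟩ := hcur cc rfl
              have hfil : (h0 :: tl0).filter (· ≠ "") = h0 :: tl0.filter (· ≠ "") := by simp [hne]
              have hst : stepA ⟨[], (some (h0 :: tl0)).isSome, ((some (h0 :: tl0)).getD []).filter (· ≠ ""), c, t⟩ l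
                  = ⟨["```"] ++ (h0 :: tl0).filter (· ≠ "") ++ ["```"], true, [PySem.Str.strip l], c, t⟩ := by
                simp only [stepA, Option.isSome_some, Option.isSome_none, Option.getD_some, Option.getD_none]
                rw [if_neg (by simp [hb]), if_neg hC, if_neg hT, if_pos hK2]
                simp [hfil, hne]
              rw [hst]
              have key := sim1 ls c t (["```"] ++ (h0 :: tl0).filter (· ≠ "") ++ ["```"]) (some [PySem.Str.strip l])
                (by simp) (by intro cc' hh; cases hh; simp)
              simp only [Option.isSome_some, Option.isSome_none, Option.getD_some, Option.getD_none] at key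
              rw [key, hsurv]
              rw [show segGo (l :: remBoth c t ls) (some (h0 :: tl0)) [] =
                  [SegB.code (h0 :: tl0)] ++ segGo (remBoth c t ls) (some [PySem.Str.strip l]) [] by
                simp only [segGo]; rw [if_pos hK]; rw [segGo_acc]; simp]
              rw [show firstFix ([SegB.code (h0 :: tl0)] ++ segGo (remBoth c t ls) (some [PySem.Str.strip l]) []) = SegB.code ((h0 :: tl0).filter (· ≠ "")) :: segGo (remBoth c t ls) (some [PySem.Str.strip l]) [] from rfl]
              simp [renderSeg]
          · have hK2 : ¬((PySem.Str.startswith (PySem.Str.strip l) "func " || PySem.Str.startswith (PySem.Str.strip l) "type " || PySem.Str.startswith (PySem.Str.strip l) "const " || PySem.Str.startswith (PySem.Str.strip l) "var " || PySem.Str.startswith (PySem.Str.strip l) "package " || PySem.Str.startswith (PySem.Str.strip l) "import ") = true) := hK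
            cases cur with
            | some cc =>
              obtain ⟨h0, tl0, rfl, hne⟩ := hcur cc rfl
              have hst : stepA ⟨[], (some (h0 :: tl0)).isSome, ((some (h0 :: tl0)).getD []).filter (· ≠ ""), c, t⟩ l
                  = ⟨[], true, (h0 :: tl0).filter (· ≠ "") ++ [PySem.Str.strip l], c, t⟩ := by
                simp only [stepA, Option.isSome_some, Option.isSome_none, Option.getD_some, Option.getD_none]
                rw [if_neg (by simp [hb]), if_neg hC, if_neg hT, if_neg hK2, if_pos (show True from trivial), if_pos hb]
              rw [hst]
              have key := ih c t (some ((h0 :: tl0) ++ [PySem.Str.strip l])) (by intro cc' hh; cases hh; exact ⟨h0, tl0 ++ [PySem.Str.strip l], rfl, hne⟩)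
              simp only [Option.isSome_some, Option.isSome_none, Option.getD_some, Option.getD_none] at key
              rw [show ((h0 :: tl0) ++ [PySem.Str.strip l]).filter (· ≠ "") = (h0 :: tl0).filter (· ≠ "") ++ [PySem.Str.strip l] by rw [show h0 :: tl0 ++ [PySem.Str.strip l] = (h0 :: tl0) ++ [PySem.Str.strip l] from rfl, List.filter_append]; simp [hb]] at key
              rw [key, hsurv]
              rw [show segGo (l :: remBoth c t ls) (some (h0 :: tl0)) [] =
                  segGo (remBoth c t ls) (some ((h0 :: tl0) ++ [PySem.Str.strip l])) [] by
                simp only [segGo]; rw [if_neg hK]]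
            | none =>
              by_cases hS : PySem.Str.startswith (PySem.Str.strip l) "//" = true
              · by_cases hI : PySem.Str.strip (PySem.Str.slice (PySem.Str.strip l) (some 2) none) = ""
                · have hst : stepA ⟨[], (none : Option (List String)).isSome, ((none : Option (List String)).getD []).filter (· ≠ ""), c, t⟩ l
                      = ⟨[], false, List.filter (fun a => a ≠ "") [], c, t⟩ := by
                    simp only [stepA, Option.isSome_some, Option.isSome_none, Option.getD_some, Option.getD_none]
                    rw [if_neg (by simp [hb]), if_neg hC, if_neg hT, if_neg hK2, if_neg (show ¬(false = true) by decide),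
                      if_pos hS, if_neg (not_not_intro hI)]
                  rw [hst]
                  have key := ih c t none (by intro cc hh; cases hh)
                  simp only [Option.isSome_some, Option.isSome_none, Option.getD_some, Option.getD_none] at key
                  rw [key, hsurv]
                  rw [show segGo (l :: remBoth c t ls) none [] = segGo (remBoth c t ls) none [] by
                    simp only [segGo]; rw [if_neg hK, if_pos hS, if_neg (not_not_intro hI)]]
                · have hst : stepA ⟨[], (none : Option (List String)).isSome, ((none : Option (List String)).getD []).filter (· ≠ ""), c, t⟩ l
                      = ⟨[] ++ ["*" ++ PySem.Str.replace (PySem.Str.replace (PySem.Str.strip (PySem.Str.slice (PySem.Str.strip l) (some 2) none)) "'" "\\'") "\"" "\\\"" ++ "*"], false, List.filter (fun x => decide (x ≠ "")) [], c, t⟩ := by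
                    simp only [stepA, Option.isSome_some, Option.isSome_none, Option.getD_some, Option.getD_none]
                    rw [if_neg (by simp [hb]), if_neg hC, if_neg hT, if_neg hK2, if_neg (show ¬(false = true) by decide),
                      if_pos hS, if_pos hI]
                  rw [hst]
                  simp only [List.filter_nil]
                  have key := sim1 ls c t ([] ++ ["*" ++ PySem.Str.replace (PySem.Str.replace (PySem.Str.strip (PySem.Str.slice (PySem.Str.strip l) (some 2) none)) "'" "\\'") "\"" "\\\"" ++ "*"]) none (by simp) (by intro cc hh; cases hh)
                  simp only [Option.isSome_some, Option.isSome_none, Option.getD_some, Option.getD_none] at key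
                  rw [key, hsurv]
                  rw [show segGo (l :: remBoth c t ls) none [] =
                  [SegB.comment (PySem.Str.strip (PySem.Str.slice (PySem.Str.strip l) (some 2) none))] ++ segGo (remBoth c t ls) none [] by
                simp only [segGo]; rw [if_neg hK, if_pos hS, if_pos hI]; rw [segGo_acc]; simp]
                  rw [show firstFix ([SegB.comment (PySem.Str.strip (PySem.Str.slice (PySem.Str.strip l) (some 2) none))] ++ segGo (remBoth c t ls) none []) = SegB.comment (PySem.Str.strip (PySem.Str.slice (PySem.Str.strip l) (some 2) none)) :: segGo (remBoth c t ls) none [] from rfl]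
                  simp [renderSeg, escB]
              · have hst : stepA ⟨[], (none : Option (List String)).isSome, ((none : Option (List String)).getD []).filter (· ≠ ""), c, t⟩ l
                    = ⟨[] ++ [PySem.Str.replace (PySem.Str.replace (PySem.Str.strip l) "'" "\\'") "\"" "\\\""], false, List.filter (fun x => decide (x ≠ "")) [], c, t⟩ := by
                  simp only [stepA, Option.isSome_some, Option.isSome_none, Option.getD_some, Option.getD_none]
                  rw [if_neg (by simp [hb]), if_neg hC, if_neg hT, if_neg hK2, if_neg (show ¬(false = true) by decide),
                    if_neg hS, if_pos hb]
                rw [hst]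
                simp only [List.filter_nil]
                have key := sim1 ls c t ([] ++ [PySem.Str.replace (PySem.Str.replace (PySem.Str.strip l) "'" "\\'") "\"" "\\\""]) none (by simp) (by intro cc hh; cases hh)
                simp only [Option.isSome_some, Option.isSome_none, Option.getD_some, Option.getD_none] at key
                rw [key, hsurv]
                rw [show segGo (l :: remBoth c t ls) none [] =
                  [SegB.text (PySem.Str.strip l)] ++ segGo (remBoth c t ls) none [] by
                simp only [segGo]; rw [if_neg hK, if_neg hS, if_pos hb]; rw [segGo_acc]; simp]
                rw [show firstFix ([SegB.text (PySem.Str.strip l)] ++ segGo (remBoth c t ls) none []) = SegB.text (PySem.Str.strip l) :: segGo (remBoth c t ls) none [] from rfl]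
                simp [renderSeg, escB]

-- ===== tightness: A ≠ B everywhere inside D_ =====

theorem seg_first_code (ls : List String) (c : List String) :
    ∃ pre rest, segGo ls (some c) [] = SegB.code (c ++ pre) :: rest := by
  induction ls generalizing c with
  | nil => exact ⟨[], [], by simp [segGo]⟩
  | cons l ls ih =>
    by_cases hk : isCodeStartB (PySem.Str.strip l) = true
    · refine ⟨[], segGo ls (some [PySem.Str.strip l]) [], ?_⟩
      simp only [segGo, hk, if_true]
      rw [segGo_acc]
      simp
    · obtain ⟨pre, rest, hpr⟩ := ih (c ++ [PySem.Str.strip l])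
      refine ⟨PySem.Str.strip l :: pre, rest, ?_⟩
      simp only [segGo, hk, Bool.false_eq_true, if_false]
      rw [hpr]
      simp

theorem inside_blank (ls : List String) (c : List String)
    (h : (ls.takeWhile (fun x => !dIsCode (PySem.Str.strip x))).any (fun x => PySem.Str.strip x == "") = true) :
    ∃ c' rest, segGo ls (some c) [] = SegB.code c' :: rest ∧ "" ∈ c' := by
  induction ls generalizing c with
  | nil => simp at h
  | cons l ls ih =>
    by_cases hk : isCodeStartB (PySem.Str.strip l) = true
    · exfalso
      rw [List.takeWhile_cons] at h
      rw [dIsCode_eq, hk] at h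
      simp at h
    · have hk' : dIsCode (PySem.Str.strip l) = false := by
        rw [dIsCode_eq]; exact Bool.eq_false_iff.mpr hk
      rw [List.takeWhile_cons, hk'] at h
      simp only [Bool.not_false, if_true, List.any_cons, Bool.or_eq_true, beq_iff_eq] at h
      simp only [segGo, hk, Bool.false_eq_true, if_false]
      by_cases hb : PySem.Str.strip l = ""
      · obtain ⟨pre, rest, hpr⟩ := seg_first_code ls (c ++ [PySem.Str.strip l])
        refine ⟨c ++ [PySem.Str.strip l] ++ pre, rest, by rw [hpr], ?_⟩
        rw [hb]
        simp
      · rcases h with h | h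
        · exact absurd h hb
        · obtain ⟨c', rest, hpr, hm⟩ := ih (c ++ [PySem.Str.strip l]) h
          exact ⟨c', rest, hpr, hm⟩

theorem dHit_blank (ls : List String) (h : dHit ls = true) :
    ∃ c rest, segGo ls none [] = SegB.code c :: rest ∧ "" ∈ c := by
  induction ls with
  | nil => exact absurd h (by decide)
  | cons l ls ih =>
    by_cases hb : PySem.Str.strip l = ""
    · have hsk : dSkip l = true := by simp [dSkip, hb]
      have h' : dHit ls = true := by
        rw [dHit] at h; rw [List.dropWhile_cons, if_pos hsk] at h; rw [dHit]; exact h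
      simp only [segGo]
      rw [if_neg (show ¬(isCodeStartB (PySem.Str.strip l) = true) by rw [hb]; decide),
        if_neg (show ¬(PySem.Str.startswith (PySem.Str.strip l) "//" = true) by rw [hb]; decide),
        if_neg (not_not_intro hb)]
      exact ih h'
    · by_cases hk : isCodeStartB (PySem.Str.strip l) = true
      · have hnc := code_not_comment _ hk
        have hsk : dSkip l = false := by
          unfold dSkip
          rw [hnc, Bool.false_and, Bool.or_false, beq_eq_false_iff_ne]
          exact hb
        have h' : (ls.takeWhile (fun x => !dIsCode (PySem.Str.strip x))).any (fun x => PySem.Str.strip x == "") = true := by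
          have hd : List.dropWhile dSkip (l :: ls) = l :: ls := by
            rw [List.dropWhile_cons, if_neg (by rw [hsk]; exact Bool.false_ne_true)]
          rw [dHit, hd] at h
          have hmm : (dIsCode (PySem.Str.strip l) &&
              (ls.takeWhile (fun x => !dIsCode (PySem.Str.strip x))).any (fun x => PySem.Str.strip x == "")) = true := h
          rw [dIsCode_eq, hk, Bool.true_and] at hmm
          exact hmm
        simp only [segGo, hk, if_true]
        exact inside_blank ls [PySem.Str.strip l] h'
      · by_cases h2 : PySem.Str.startswith (PySem.Str.strip l) "//" = true
        · by_cases h3 : PySem.Str.strip (PySem.Str.slice (PySem.Str.strip l) (some 2) none) = ""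
          · have hsk : dSkip l = true := by
              unfold dSkip
              rw [h2, Bool.true_and,
                show (PySem.Str.strip (PySem.Str.slice (PySem.Str.strip l) (some 2) none) == "") = true from beq_iff_eq.mpr h3,
                Bool.or_true]
            have h' : dHit ls = true := by
              rw [dHit] at h; rw [List.dropWhile_cons, if_pos hsk] at h; rw [dHit]; exact h
            simp only [segGo, hk, h2, Bool.false_eq_true, if_false, if_true, ne_eq]
            rw [if_neg (not_not_intro h3)]
            exact ih h'
          · exfalso
            have hsk : dSkip l = false := by
              unfold dSkip
              rw [beq_eq_false_iff_ne.mpr hb, Bool.false_or, h2, Bool.true_and]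
              exact beq_eq_false_iff_ne.mpr h3
            have hd : List.dropWhile dSkip (l :: ls) = l :: ls := by
              rw [List.dropWhile_cons, if_neg (by rw [hsk]; exact Bool.false_ne_true)]
            rw [dHit, hd] at h
            have hmm : (dIsCode (PySem.Str.strip l) &&
                (ls.takeWhile (fun x => !dIsCode (PySem.Str.strip x))).any (fun x => PySem.Str.strip x == "")) = true := h
            rw [dIsCode_eq, Bool.eq_false_iff.mpr hk, Bool.false_and] at hmm
            exact absurd hmm (by decide)
        · exfalso
          have hsk : dSkip l = false := by
            unfold dSkip
            rw [beq_eq_false_iff_ne.mpr hb, Bool.false_or, Bool.eq_false_iff.mpr h2, Bool.false_and]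
          have hd : List.dropWhile dSkip (l :: ls) = l :: ls := by
            rw [List.dropWhile_cons, if_neg (by rw [hsk]; exact Bool.false_ne_true)]
          rw [dHit, hd] at h
          have hmm : (dIsCode (PySem.Str.strip l) &&
              (ls.takeWhile (fun x => !dIsCode (PySem.Str.strip x))).any (fun x => PySem.Str.strip x == "")) = true := h
          rw [dIsCode_eq, Bool.eq_false_iff.mpr hk, Bool.false_and] at hmm
          exact absurd hmm (by decide)

theorem join_len (x : List Char) (xs : List (List Char)) :
    (PySem.Chars.join ['\n'] (x :: xs)).length = x.length + ((xs.map List.length).sum + xs.length) := by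
  induction xs generalizing x with
  | nil => simp [PySem.Chars.join_singleton]
  | cons y ys ih =>
    rw [PySem.Chars.join_cons_cons]
    simp only [List.length_append, ih y, List.map_cons, List.sum_cons, List.length_cons,
      List.length_nil]
    omega

theorem join_split (x : List Char) (xs ys : List (List Char)) (hys : ys ≠ []) :
    PySem.Chars.join ['\n'] ((x :: xs) ++ ys)
      = PySem.Chars.join ['\n'] (x :: xs) ++ '\n' :: PySem.Chars.join ['\n'] ys := by
  induction xs generalizing x with
  | nil =>
    cases ys with
    | nil => exact absurd rfl hys
    | cons y ys' =>
      rw [List.cons_append, List.nil_append, PySem.Chars.join_cons_cons, PySem.Chars.join_singleton]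
      simp
  | cons z zs ih =>
    rw [List.cons_append, List.cons_append,
      show PySem.Chars.join ['\n'] (x :: z :: (zs ++ ys))
          = x ++ ['\n'] ++ PySem.Chars.join ['\n'] (z :: (zs ++ ys)) from
        PySem.Chars.join_cons_cons _ _ _ _,
      show PySem.Chars.join ['\n'] (z :: (zs ++ ys)) = PySem.Chars.join ['\n'] ((z :: zs) ++ ys) from rfl,
      ih z, PySem.Chars.join_cons_cons]
    simp

theorem join_bt_shape (xs : List (List Char)) :
    ∃ t, PySem.Chars.join ['\n'] (['`','`','`'] :: xs) = '`' :: '`' :: '`' :: t := by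
  cases xs with
  | nil => exact ⟨[], by rw [PySem.Chars.join_singleton]⟩
  | cons y ys => exact ⟨'\n' :: PySem.Chars.join ['\n'] (y :: ys), by rw [PySem.Chars.join_cons_cons]; rfl⟩

theorem strip_append_of (S U : List Char) (a : Char) (t : List Char)
    (hS : S = a :: t) (ha : PySem.Chars.isspace a = false)
    (u : Char) (hu : u ∈ U) (hws : PySem.Chars.isspace u = false) :
    PySem.Chars.strip (S ++ U) = S ++ PySem.Chars.rstrip U := by
  unfold PySem.Chars.strip PySem.Chars.lstrip PySem.Chars.rstrip
  subst hS
  rw [List.cons_append, List.dropWhile_cons, if_neg (by rw [ha]; exact Bool.false_ne_true)]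
  rw [show (a :: (t ++ U)).reverse = U.reverse ++ (a :: t).reverse by simp]
  rw [List.dropWhile_append]
  have hne : List.dropWhile PySem.Chars.isspace U.reverse ≠ [] := by
    rw [ne_eq, List.dropWhile_eq_nil_iff]
    intro hall
    exact absurd (hall u (List.mem_reverse.mpr hu)) (by rw [hws]; exact Bool.false_ne_true)
  rw [if_neg (by simpa using hne)]
  simp

theorem toList_filter (c : List String) :
    (c.filter (fun x => x ≠ "")).map String.toList = (c.map String.toList).filter (fun x => x ≠ []) := by
  induction c with
  | nil => rfl
  | cons a c ih =>
    simp only [ne_eq, decide_not] at ih ⊢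
    by_cases ha : a = ""
    · subst ha
      simpa using ih
    · have ha' : a.toList ≠ [] := by
        intro hx
        exact ha (by
          have := congrArg String.ofList hx
          rwa [String.ofList_toList] at this)
      simp [ha, ha', ih]

theorem sum_len_filter (c : List (List Char)) :
    ((c.filter (fun x => x ≠ [])).map List.length).sum = (c.map List.length).sum := by
  induction c with
  | nil => rfl
  | cons a c ih =>
    simp only [ne_eq, decide_not] at ih ⊢
    by_cases ha : a = []
    · subst ha; simpa using ih
    · simp [ha, ih]

theorem out_ne_chars (c tail : List (List Char)) (h : [] ∈ c) :
    PySem.Chars.strip (PySem.Chars.join ['\n'] (['`','`','`'] :: (c.filter (fun x => x ≠ []) ++ ['`','`','`'] :: tail)))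
    ≠ PySem.Chars.strip (PySem.Chars.join ['\n'] (['`','`','`'] :: (c ++ ['`','`','`'] :: tail))) := by
  have hs1 := join_split ['`','`','`'] (c.filter (fun x => x ≠ [])) (['`','`','`'] :: tail) (by simp)
  have hs2 := join_split ['`','`','`'] c (['`','`','`'] :: tail) (by simp)
  rw [show (['`','`','`'] :: (c.filter (fun x => x ≠ []) ++ ['`','`','`'] :: tail))
      = (['`','`','`'] :: c.filter (fun x => x ≠ [])) ++ ['`','`','`'] :: tail by simp, hs1]
  rw [show (['`','`','`'] :: (c ++ ['`','`','`'] :: tail))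
      = (['`','`','`'] :: c) ++ ['`','`','`'] :: tail by simp, hs2]
  obtain ⟨t1, ht1⟩ := join_bt_shape (c.filter (fun x => x ≠ []))
  obtain ⟨t2, ht2⟩ := join_bt_shape c
  obtain ⟨t3, ht3⟩ := join_bt_shape tail
  have hmem : ('`' : Char) ∈ '\n' :: PySem.Chars.join ['\n'] (['`','`','`'] :: tail) := by
    rw [ht3]; simp
  rw [show PySem.Chars.join ['\n'] (['`','`','`'] :: c.filter (fun x => x ≠ [])) ++ '\n' :: PySem.Chars.join ['\n'] (['`','`','`'] :: tail)
      = PySem.Chars.join ['\n'] (['`','`','`'] :: c.filter (fun x => x ≠ [])) ++ ('\n' :: PySem.Chars.join ['\n'] (['`','`','`'] :: tail)) from rfl]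
  rw [strip_append_of _ _ '`' ('`' :: '`' :: t1) ht1 (by decide) '`' hmem (by decide)]
  rw [strip_append_of _ _ '`' ('`' :: '`' :: t2) ht2 (by decide) '`' hmem (by decide)]
  intro heq
  have hlen := congrArg List.length heq
  simp only [List.length_append] at hlen
  have h1 := join_len (['`','`','`'] : List Char) (c.filter (fun x => x ≠ []))
  have h2 := join_len (['`','`','`'] : List Char) c
  rw [h1, h2, sum_len_filter] at hlen
  have hlt : (c.filter (fun x => x ≠ [])).length < c.length :=
    List.length_filter_lt_length_iff_exists.mpr ⟨[], h, by simp⟩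
  omega

-- ===== VERDICT (by name: the statement is the Claim_ definition above) =====
theorem clean_go_doc_output_spec : Claim_unchanged_clean_go_doc_output := by
  intro doc _
  intro hnd
  unfold clean_go_doc_output clean_go_doc_output_alt
  by_cases h : doc = ""
  · simp [h]
  · rw [if_neg h, if_neg h]
    dsimp only
    have hproc : ∀ L : List String, dHit (removeFirstB "TYPES" (removeFirstB "CONSTANTS" L)) = false →
        finA (List.foldl stepA ⟨[], false, [], false, false⟩ L)
          = (segGo (removeFirstB "TYPES" (removeFirstB "CONSTANTS" L)) none []).flatMap renderSeg := by
      intro L hnb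
      have key := sim0 L false false none (by intro cc hh; cases hh)
      simp only [Option.isSome_none, Option.getD_none, List.filter_nil] at key
      rw [remBoth_ff] at key
      rw [firstFix_before _ hnb] at key
      exact key
    have hnb : ∀ L : List String,
        L = ((PySem.Str.split? doc "\n").getD []).drop 1 →
        dHit (removeFirstB "TYPES" (removeFirstB "CONSTANTS" L)) = false := by
      intro L hL
      rcases Bool.eq_false_or_eq_true (dHit (removeFirstB "TYPES" (removeFirstB "CONSTANTS" L))) with hx | hx
      · exact absurd ⟨h, by rw [dRemoveFirst_eq, dRemoveFirst_eq, ← hL]; exact hx⟩ hnd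
      · exact hx
    by_cases hl : ((PySem.Str.split? doc "\n").getD []) = []
    · rw [if_neg (not_not_intro hl), hl]
      have hnb0 := hnb (((PySem.Str.split? doc "\n").getD []).drop 1) rfl
      rw [hl] at hnb0
      exact congrArg (fun x => PySem.Str.strip (PySem.Str.join "\n" x)) (hproc ([] : List String) hnb0)
    · rw [if_pos hl]
      exact congrArg (fun x => PySem.Str.strip (PySem.Str.join "\n" x))
        (hproc (((PySem.Str.split? doc "\n").getD []).drop 1) (hnb _ rfl))

theorem clean_go_doc_output_changed : Claim_changed_clean_go_doc_output := by
  unfold Claim_changed_clean_go_doc_output; decide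

theorem clean_go_doc_output_tight : Claim_exact_clean_go_doc_output := by
  intro doc _ hd
  obtain ⟨hne, hhit⟩ := hd
  rw [dRemoveFirst_eq, dRemoveFirst_eq] at hhit
  unfold clean_go_doc_output clean_go_doc_output_alt
  rw [if_neg hne, if_neg hne]
  dsimp only
  by_cases hl : ((PySem.Str.split? doc "\n").getD []) = []
  · exfalso
    rw [hl] at hhit
    exact absurd hhit (by decide)
  · rw [if_pos hl]
    set L := removeFirstB "TYPES" (removeFirstB "CONSTANTS" (((PySem.Str.split? doc "\n").getD []).drop 1)) with hL
    have hA : finA (List.foldl stepA ⟨[], false, [], false, false⟩ (((PySem.Str.split? doc "\n").getD []).drop 1))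
        = (firstFix (segGo L none [])).flatMap renderSeg := by
      have key := sim0 (((PySem.Str.split? doc "\n").getD []).drop 1) false false none (by intro cc hh; cases hh)
      simp only [Option.isSome_none, Option.getD_none, List.filter_nil] at key
      rw [remBoth_ff] at key
      exact key
    obtain ⟨c, rest, hseg, hmem⟩ := dHit_blank L hhit
    rw [show (if (List.foldl stepA ⟨[], false, [], false, false⟩ (((PySem.Str.split? doc "\n").getD []).drop 1)).inCode = true ∧ ¬(List.foldl stepA ⟨[], false, [], false, false⟩ (((PySem.Str.split? doc "\n").getD []).drop 1)).content = [] then (List.foldl stepA ⟨[], false, [], false, false⟩ (((PySem.Str.split? doc "\n").getD []).drop 1)).cleaned ++ ["```"] ++ (List.foldl stepA ⟨[], false, [], false, false⟩ (((PySem.Str.split? doc "\n").getD []).drop 1)).content ++ ["```"] else (List.foldl stepA ⟨[], false, [], false, false⟩ (((PySem.Str.split? doc "\n").getD []).drop 1)).cleaned)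
        = finA (List.foldl stepA ⟨[], false, [], false, false⟩ (((PySem.Str.split? doc "\n").getD []).drop 1)) from rfl]
    rw [hA, hseg]
    rw [show firstFix (SegB.code c :: rest) = SegB.code (c.filter (· ≠ "")) :: rest from rfl]
    intro heq
    have hchars := congrArg String.toList heq
    rw [PySem.Str.toList_strip, PySem.Str.toList_strip, PySem.Str.toList_join, PySem.Str.toList_join] at hchars
    have hflat1 : (SegB.code (c.filter (· ≠ "")) :: rest).flatMap renderSeg
        = "```" :: (c.filter (· ≠ "") ++ "```" :: rest.flatMap renderSeg) := by
      simp [renderSeg]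
    have hflat2 : (SegB.code c :: rest).flatMap renderSeg
        = "```" :: (c ++ "```" :: rest.flatMap renderSeg) := by
      simp [renderSeg]
    rw [hflat1, hflat2] at hchars
    have hmap1 : ("```" :: (c.filter (· ≠ "") ++ "```" :: rest.flatMap renderSeg)).map String.toList
        = ['`','`','`'] :: ((c.map String.toList).filter (fun x => x ≠ []) ++ ['`','`','`'] :: (rest.flatMap renderSeg).map String.toList) := by
      simp only [List.map_cons, List.map_append]
      rw [toList_filter]
      rfl
    have hmap2 : ("```" :: (c ++ "```" :: rest.flatMap renderSeg)).map String.toList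
        = ['`','`','`'] :: (c.map String.toList ++ ['`','`','`'] :: (rest.flatMap renderSeg).map String.toList) := by
      simp only [List.map_cons, List.map_append]
      rfl
    rw [hmap1, hmap2] at hchars
    exact out_ne_chars (c.map String.toList) ((rest.flatMap renderSeg).map String.toList)
      (List.mem_map.mpr ⟨"", hmem, rfl⟩) hchars
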